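-- pv_equiv track=rewrite | github.com/wenzhengd/lichen | src/lichen/block_structure_analyzer.py | _support_width
-- ===== SOURCE A (Python) =====
-- def _support_width(labels: tuple[str, ...]) -> int:
--     """Return the number of qubits touched by at least one label in a component."""
--
--     if not labels:
--         return 0
--     touched = 0
--     for qubit_letters in zip(*labels):
--         if any(letter != "I" for letter in qubit_letters):
--             touched += 1
--     return touched
-- ===== SOURCE B (Python) =====
-- def _support_width(labels: tuple[str, ...]) -> int:
--     """Return the number of qubits touched by at least one label in a component."""
--     if not labels:
--         return 0
--     L = min(len(label) for label in labels)
--     touched = set()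
--     for label in labels:
--         for i, ch in enumerate(label[:L]):
--             if ch != "I":
--                 touched.add(i)
--     return len(touched)
-- ===== Notes on version B (the rewrite author's own statement) =====
-- stated objective: alternative
-- what changed: Instead of transposing with zip(*labels) and testing each column with any(), B scans the labels row-major, collecting into a set the indices (below the minimum label length) holding a non-'I' character, and returns the set's size.
import Mathlib
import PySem

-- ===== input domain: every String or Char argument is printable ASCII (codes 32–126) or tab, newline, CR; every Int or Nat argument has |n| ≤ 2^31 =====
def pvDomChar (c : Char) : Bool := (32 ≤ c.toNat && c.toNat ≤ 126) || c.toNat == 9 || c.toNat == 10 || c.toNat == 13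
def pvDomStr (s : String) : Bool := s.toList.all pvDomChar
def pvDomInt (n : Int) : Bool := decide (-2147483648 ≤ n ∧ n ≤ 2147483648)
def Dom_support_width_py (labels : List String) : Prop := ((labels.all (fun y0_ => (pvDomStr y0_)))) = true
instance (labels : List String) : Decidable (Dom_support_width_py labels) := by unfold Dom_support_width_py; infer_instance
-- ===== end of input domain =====

-- B replaces A's zip(*labels)-and-any column scan by a row-major pass collecting the touched
-- indices into a set (objective: alternative decomposition, same cost).

-- ===== PORT A =====
-- zip(*labels) yields the columns j = 0 .. (min label length) - 1; the j-th column is the list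
-- of j-th characters (j is in range for every label, so getD's default never fires).
def support_width_py (labels : List String) : Int :=
  match labels with
  | [] => 0
  | l :: ls =>
    let L : Nat := ls.foldl (fun m s => min m s.toList.length) l.toList.length
    (List.range L).foldl
      (fun touched j =>
        let qubit_letters := (l :: ls).map (fun s => s.toList.getD j 'I')
        if qubit_letters.any (fun letter => letter ≠ 'I') then touched + 1 else touched)
      0

-- ===== PORT B =====
def support_width_py_alt (labels : List String) : Int :=
  match labels with
  | [] => 0
  | l :: ls =>
    let L : Nat := ls.foldl (fun m s => min m s.toList.length) l.toList.length
    let touched : PySem.Set Int :=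
      (l :: ls).foldl
        (fun acc label =>
          (PySem.List.enumerate (label.toList.take L)).foldl
            (fun acc p => if p.2 ≠ 'I' then PySem.Set.add acc p.1 else acc)
            acc)
        PySem.Set.empty
    (touched.length : Int)

-- ===== PRECONDITION & SPEC =====
def Spec_support_width_py (labels : List String) (out : Int) : Prop := out = support_width_py_alt labels
instance (labels : List String) (out : Int) : Decidable (Spec_support_width_py labels out) := by unfold Spec_support_width_py; infer_instance

-- ===== CLAIM (what is proved, stated in full; the proofs are below) =====
def Claim_equal_support_width_py : Prop := ∀ (labels : List String), Dom_support_width_py labels → Spec_support_width_py labels (support_width_py labels)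

-- ===== LEMMAS AND PROOFS =====

theorem foldl_count (p : Nat → Bool) (js : List Nat) (t : Int) :
    js.foldl (fun touched j => if p j then touched + 1 else touched) t
      = t + (js.countP p : Int) := by
  induction js generalizing t with
  | nil => simp
  | cons j js ih =>
    simp only [List.foldl_cons, List.countP_cons, ih]
    by_cases h : p j
    · simp only [h, if_pos]; push_cast; ring
    · simp [h]

theorem nodup_inner (cs : List (Int × Char)) (acc : PySem.Set Int) (h : acc.Nodup) :
    (cs.foldl (fun acc p => if p.2 ≠ 'I' then PySem.Set.add acc p.1 else acc) acc).Nodup := by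
  induction cs generalizing acc with
  | nil => exact h
  | cons c cs ih =>
    simp only [List.foldl_cons]
    split
    · exact ih _ (PySem.Set.nodup_add _ _ h)
    · exact ih _ h

theorem mem_inner (cs : List (Int × Char)) (acc : PySem.Set Int) (i : Int) :
    i ∈ cs.foldl (fun acc p => if p.2 ≠ 'I' then PySem.Set.add acc p.1 else acc) acc
      ↔ i ∈ acc ∨ ∃ p ∈ cs, p.2 ≠ 'I' ∧ i = p.1 := by
  induction cs generalizing acc with
  | nil => simp
  | cons c cs ih =>
    simp only [List.foldl_cons, List.mem_cons]
    by_cases h : c.2 ≠ 'I'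
    · rw [if_pos (by exact h)]
      rw [ih]
      simp only [PySem.Set.mem_add]
      constructor
      · rintro ((hm | rfl) | ⟨p, hp, h1, h2⟩)
        · exact Or.inl hm
        · exact Or.inr ⟨c, Or.inl rfl, h, rfl⟩
        · exact Or.inr ⟨p, Or.inr hp, h1, h2⟩
      · rintro (hm | ⟨p, rfl | hp, h1, h2⟩)
        · exact Or.inl (Or.inl hm)
        · exact Or.inl (Or.inr h2)
        · exact Or.inr ⟨p, hp, h1, h2⟩
    · rw [if_neg (by exact h)]
      rw [ih]
      constructor
      · rintro (hm | ⟨p, hp, h1, h2⟩)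
        · exact Or.inl hm
        · exact Or.inr ⟨p, Or.inr hp, h1, h2⟩
      · rintro (hm | ⟨p, rfl | hp, h1, h2⟩)
        · exact Or.inl hm
        · exact absurd h1 h
        · exact Or.inr ⟨p, hp, h1, h2⟩

theorem nodup_outer (labels : List String) (L : Nat) (acc : PySem.Set Int) (h : acc.Nodup) :
    (labels.foldl (fun acc label =>
        (PySem.List.enumerate (label.toList.take L)).foldl
          (fun acc p => if p.2 ≠ 'I' then PySem.Set.add acc p.1 else acc) acc) acc).Nodup := by
  induction labels generalizing acc with
  | nil => exact h
  | cons l ls ih => exact ih _ (nodup_inner _ _ h)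

theorem mem_outer (labels : List String) (L : Nat) (acc : PySem.Set Int) (i : Int) :
    i ∈ labels.foldl (fun acc label =>
        (PySem.List.enumerate (label.toList.take L)).foldl
          (fun acc p => if p.2 ≠ 'I' then PySem.Set.add acc p.1 else acc) acc) acc
      ↔ i ∈ acc ∨ ∃ s ∈ labels, ∃ p ∈ PySem.List.enumerate (s.toList.take L), p.2 ≠ 'I' ∧ i = p.1 := by
  induction labels generalizing acc with
  | nil => simp
  | cons l ls ih =>
    simp only [List.foldl_cons, List.mem_cons]
    rw [ih, mem_inner]
    constructor
    · rintro ((hm | ⟨p, hp, h1, h2⟩) | ⟨s, hs, hrest⟩)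
      · exact Or.inl hm
      · exact Or.inr ⟨l, Or.inl rfl, p, hp, h1, h2⟩
      · exact Or.inr ⟨s, Or.inr hs, hrest⟩
    · rintro (hm | ⟨s, rfl | hs, hrest⟩)
      · exact Or.inl (Or.inl hm)
      · exact Or.inl (Or.inr hrest)
      · exact Or.inr ⟨s, hs, hrest⟩

theorem foldl_min_le_init (ls : List String) (a : Nat) :
    ls.foldl (fun m s => min m s.toList.length) a ≤ a := by
  induction ls generalizing a with
  | nil => simp
  | cons l ls ih =>
    simp only [List.foldl_cons]
    exact le_trans (ih _) (min_le_left _ _)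

theorem min_foldl_le (ls : List String) (a : Nat) (s : String) (hs : s ∈ ls) :
    ls.foldl (fun m s => min m s.toList.length) a ≤ s.toList.length := by
  induction ls generalizing a with
  | nil => cases hs
  | cons l ls ih =>
    simp only [List.foldl_cons]
    rcases List.mem_cons.mp hs with rfl | hs
    · exact le_trans (foldl_min_le_init ls _) (min_le_right _ _)
    · exact ih _ hs

theorem key_count (l : String) (ls : List String) (L : Nat)
    (hLle : ∀ s ∈ l :: ls, L ≤ s.toList.length) :
    ((List.range L).countP
        (fun j => ((l :: ls).map (fun s => s.toList.getD j 'I')).any (fun letter => letter ≠ 'I')))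
      = ((l :: ls).foldl
          (fun acc label =>
            (PySem.List.enumerate (label.toList.take L)).foldl
              (fun acc p => if p.2 ≠ 'I' then PySem.Set.add acc p.1 else acc) acc)
          PySem.Set.empty).length := by
  set P : Nat → Bool :=
    fun j => ((l :: ls).map (fun s => s.toList.getD j 'I')).any (fun letter => letter ≠ 'I') with hP
  set touched := ((l :: ls).foldl
      (fun acc label =>
        (PySem.List.enumerate (label.toList.take L)).foldl
          (fun acc p => if p.2 ≠ 'I' then PySem.Set.add acc p.1 else acc) acc)
      PySem.Set.empty) with htouched
  have hnodup : touched.Nodup := nodup_outer _ _ _ List.nodup_nil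
  have hmem : ∀ i : Int, i ∈ touched ↔ ∃ k : Nat, k < L ∧ P k = true ∧ i = (k : Int) := by
    intro i
    rw [htouched, mem_outer]
    constructor
    · rintro (hm | ⟨s, hs, p, hp, hI, hi⟩)
      · exact absurd hm (List.not_mem_nil)
      · obtain ⟨k, hk, rfl⟩ := (PySem.List.mem_enumerate_iff _ _ _).mp hp
        have hlen : L ≤ s.toList.length := hLle s hs
        have hkL : k < L := by
          rw [List.length_take] at hk; omega
        have hklen : k < s.toList.length := lt_of_lt_of_le hkL hlen
        refine ⟨k, hkL, ?_, by simpa using hi⟩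
        rw [hP]
        simp only [List.any_eq_true, List.mem_map, decide_eq_true_eq]
        refine ⟨s.toList.getD k 'I', ⟨s, hs, rfl⟩, ?_⟩
        rw [List.getD_eq_getElem _ _ hklen]
        simpa [List.getElem_take] using hI
    · rintro ⟨k, hkL, hPk, rfl⟩
      right
      rw [hP] at hPk
      simp only [List.any_eq_true, List.mem_map, decide_eq_true_eq] at hPk
      obtain ⟨c, ⟨s, hs, rfl⟩, hc⟩ := hPk
      have hklen : k < s.toList.length := lt_of_lt_of_le hkL (hLle s hs)
      have hktake : k < (s.toList.take L).length := by
        rw [List.length_take]; omega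
      refine ⟨s, hs, ((0 : Int) + (k : Int), (s.toList.take L)[k]'hktake), ?_, ?_, by simp⟩
      · exact (PySem.List.mem_enumerate_iff _ _ _).mpr ⟨k, hktake, rfl⟩
      · show (s.toList.take L)[k]'hktake ≠ 'I'
        rw [List.getElem_take]
        rw [List.getD_eq_getElem _ _ hklen] at hc
        exact hc
  have hinj : Function.Injective (fun k : Nat => (k : Int)) := fun a b h => by simpa using h
  have hTnodup : (((List.range L).filter P).map (fun k : Nat => (k : Int))).Nodup :=
    (List.nodup_range.filter _).map hinj
  have hTmem : ∀ i : Int,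
      i ∈ ((List.range L).filter P).map (fun k : Nat => (k : Int))
        ↔ ∃ k : Nat, k < L ∧ P k = true ∧ i = (k : Int) := by
    intro i
    simp only [List.mem_map, List.mem_filter, List.mem_range]
    constructor
    · rintro ⟨k, ⟨hk, hp⟩, rfl⟩; exact ⟨k, hk, hp, rfl⟩
    · rintro ⟨k, hk, hp, rfl⟩; exact ⟨k, ⟨hk, hp⟩, rfl⟩
  have hperm : touched.Perm (((List.range L).filter P).map (fun k : Nat => (k : Int))) :=
    (List.perm_ext_iff_of_nodup hnodup hTnodup).mpr (fun i => (hmem i).trans (hTmem i).symm)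
  calc (List.range L).countP P
      = ((List.range L).filter P).length := List.countP_eq_length_filter
    _ = (((List.range L).filter P).map (fun k : Nat => (k : Int))).length := by simp
    _ = touched.length := hperm.length_eq.symm

theorem support_width_py_spec : Claim_equal_support_width_py := by
  intro labels _
  unfold Spec_support_width_py
  cases labels with
  | nil => rfl
  | cons l ls =>
    have hLle : ∀ s ∈ l :: ls,
        ls.foldl (fun m s => min m s.toList.length) l.toList.length ≤ s.toList.length := by
      intro s hs
      rcases List.mem_cons.mp hs with rfl | hs
      · exact foldl_min_le_init ls _
      · exact min_foldl_le ls _ s hs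
    simp only [support_width_py, support_width_py_alt]
    rw [foldl_count]
    rw [key_count l ls _ hLle]
    simp
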